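-- pv_equiv track=rewrite | github.com/SillyPuffin/CipherChallenge | scripts/vignere.py | LetterDistance
-- ===== SOURCE A (Python) =====
-- def LetterDistance(letterToCount,data):
--     lastOccurenceIndex = 0
--     distances = []
--     for index, letter in enumerate(data):
--         if letter == letterToCount:
--             distances.append(index - lastOccurenceIndex)
--             lastOccurenceIndex = index
--
--     return distances
-- ===== SOURCE B (Python) =====
-- def LetterDistance(letterToCount, data):
--     positions = [0] + [i for i, l in enumerate(data) if l == letterToCount]
--     return [b - a for a, b in zip(positions, positions[1:])]
-- ===== Notes on version B (the rewrite author's own statement) =====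
-- stated objective: alternative
-- what changed: Replaces the single interleaved filter-and-diff loop carrying lastOccurenceIndex state with two stateless passes: collect matching positions (prefixed by the sentinel 0), then map subtraction over adjacent pairs via zip.
import Mathlib
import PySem

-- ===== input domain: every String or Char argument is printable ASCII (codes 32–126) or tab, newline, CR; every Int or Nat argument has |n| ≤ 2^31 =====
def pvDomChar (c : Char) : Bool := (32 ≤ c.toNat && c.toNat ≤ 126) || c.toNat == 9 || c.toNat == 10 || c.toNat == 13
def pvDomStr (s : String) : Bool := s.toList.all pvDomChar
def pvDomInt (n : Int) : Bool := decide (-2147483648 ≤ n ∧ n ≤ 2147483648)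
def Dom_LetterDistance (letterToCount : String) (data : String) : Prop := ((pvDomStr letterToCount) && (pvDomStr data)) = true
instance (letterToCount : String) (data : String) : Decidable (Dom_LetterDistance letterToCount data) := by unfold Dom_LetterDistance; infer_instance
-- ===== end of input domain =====

-- B replaces A's stateful filter-and-diff loop by two stateless passes (collect sentinel-prefixed positions, then diff adjacent pairs); alternative decomposition, same cost.

-- ===== PORT A =====
def LetterDistance (letterToCount : String) (data : String) : List Int :=
  let st := (PySem.List.enumerate data.toList 0).foldl
    (fun (st : Int × List Int) p =>
      if String.ofList [p.2] == letterToCount then (p.1, st.2 ++ [p.1 - st.1]) else st)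
    (0, [])
  st.2

-- ===== PORT B =====
def LetterDistance_alt (letterToCount : String) (data : String) : List Int :=
  let positions : List Int :=
    0 :: (PySem.List.enumerate data.toList 0).filterMap
      (fun p => if String.ofList [p.2] == letterToCount then some p.1 else none)
  (positions.zip (positions.drop 1)).map (fun q => q.2 - q.1)

-- ===== PRECONDITION & SPEC =====
def Spec_LetterDistance (letterToCount : String) (data : String) (out : List Int) : Prop := out = LetterDistance_alt letterToCount data
instance (letterToCount : String) (data : String) (out : List Int) : Decidable (Spec_LetterDistance letterToCount data out) := by unfold Spec_LetterDistance; infer_instance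

-- ===== CLAIM (what is proved, stated in full; the proofs are below) =====
def Claim_equal_LetterDistance : Prop := ∀ (letterToCount : String) (data : String), Dom_LetterDistance letterToCount data → Spec_LetterDistance letterToCount data (LetterDistance letterToCount data)

-- ===== LEMMAS AND PROOFS =====

-- Invariant: A's fold appends exactly the adjacent-pair differences of (last :: filtered positions).
theorem pv_fold_eq_zip (l : String) (es : List (Int × Char)) :
    ∀ (last : Int) (acc : List Int),
    (es.foldl
      (fun (st : Int × List Int) p =>
        if String.ofList [p.2] == l then (p.1, st.2 ++ [p.1 - st.1]) else st)
      (last, acc)).2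
    = acc ++ (((last :: es.filterMap
          (fun p => if String.ofList [p.2] == l then some p.1 else none)).zip
        (es.filterMap (fun p => if String.ofList [p.2] == l then some p.1 else none))).map
        (fun q => q.2 - q.1)) := by
  induction es with
  | nil => intro last acc; simp
  | cons p es ih =>
    intro last acc
    cases hb : (String.ofList [p.2] == l) with
    | true =>
      simp only [List.foldl_cons, List.filterMap_cons, hb, reduceIte, List.zip_cons_cons,
        List.map_cons]
      rw [ih]
      simp
    | false =>
      simp only [List.foldl_cons, List.filterMap_cons, hb]
      exact ih last acc

-- ===== VERDICT (by name: the statement is the Claim_ definition above) =====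
theorem LetterDistance_spec : Claim_equal_LetterDistance := by
  intro l d _
  unfold Spec_LetterDistance LetterDistance LetterDistance_alt
  simp only [pv_fold_eq_zip, List.nil_append, List.drop_succ_cons, List.drop_zero]
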